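-- pv_equiv track=rewrite | github.com/WojtekG98/SPD | lab2/lab2.py | SchragePmtn_queue
-- ===== SOURCE A (Python) =====
-- import heapq
--
-- def SchragePmtn_queue(tablica, n):
--     Cmax = 0                                      # Cmax = 0
--     G = []                                        # G - zbiór zadań gotowych do realizacji
--     N = list(tablica)                             # N - zbiór zadań nieuszeregowanych
--     heapq.heapify(N)
--     t = 0                                         # t - zmienna pomocnicza symbolizująca chwilę czasową
--     l = [0,0,0,0]                                 # l = 0
--     l[2]=100000000                                # q0 = nieskonczonosc
--     while len(G) != 0 or len(N) != 0:             # while G nie pusty lub N nie pusty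
--                                                   # while N nie pusty i min r_j z N mniejszy lub równy t
--         while len(N) != 0 and t >= N[0][0]:
--             j = heapq.heappop(N)                  # j = arg min r_j z N (minimum z N posortowane po r) i N = N bez j
--             rj=j[0]                               # takie bajery zeby sortowalo po q i rosnaco
--             qj=j[2]
--             j=list(j)
--             j[0]=-qj
--             j[2]=rj
--             heapq.heappush(G,j)                   # G = G z j
--             if qj > l[2]:                         # jeżeli q_j większe od q_l
--                 l=list(l)                         # p_l-1 = t - r_j
--                 l[1] = t - rj
--                 t = rj                            # t = r_j
--                 if l[1] > 0:                      # jeżeli p_l-1 > 0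
--                     rl=l[0]                       # takie bajery zeby sortowalo po q i rosnaco
--                     ql=l[2]
--                     l[0]=-ql
--                     l[2]=rl
--                     heapq.heappush(G, l)          # G = G z l
--         if len(G) != 0:                           # jeżeli G nie pusty
--             j = heapq.heappop(G)                  # j = arg max q_j z G i  G = G bez j
--             qj=j[0]                               # takie bajery zeby sortowalo po q i rosnaco
--             rj=j[2]
--             j=list(j)
--             j[0]=rj
--             j[2]=-qj
--             l=j                                   # l = j
--             t = t + j[1]                          # t = t + p_j
--             Cmax = max(Cmax, t + j[2])            # Cmax = max(Cmax,t+q_j)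
--         else:                                     # jeżeli G pusty
--             t = N[0][0]                           # t = min r_j z N (minimum z N posortowane po r)
--     return Cmax
-- ===== SOURCE B (Python) =====
-- def SchragePmtn_queue(tablica, n):
--     Cmax = 0
--     G = []                      # ready jobs, kept as a plain list; max-q job = min() over [-q,p,r] encodings
--     N = list(tablica)           # unscheduled jobs, plain list; min-r job = min() over (r,p,q) tuples
--     t = 0
--     l = [0, 0, 100000000, 0]
--     while G or N:
--         while N and t >= min(N)[0]:
--             j = min(N)
--             N.remove(j)
--             rj = j[0]
--             qj = j[2]
--             G.append([-qj, j[1], rj])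
--             if qj > l[2]:
--                 l = list(l)
--                 l[1] = t - rj
--                 t = rj
--                 if l[1] > 0:
--                     rl = l[0]
--                     ql = l[2]
--                     l[0] = -ql
--                     l[2] = rl
--                     G.append(l)
--         if G:
--             j = min(G)
--             G.remove(j)
--             qj = j[0]
--             rj = j[2]
--             j = list(j)
--             j[0] = rj
--             j[2] = -qj
--             l = j
--             t = t + j[1]
--             Cmax = max(Cmax, t + j[2])
--         else:
--             t = min(N)[0]
--     return Cmax
-- ===== Notes on version B (the rewrite author's own statement) =====
-- stated objective: simpler
-- what changed: B stores the ready set G and the unscheduled set N as plain Python lists instead of heapq binary heaps: heappop becomes min() plus remove(), heappush becomes append(), peeking N[0] becomes min(N); the [-q,p,r] encodings and all loop/sentinel bookkeeping are kept, so the same job is selected with identical tie-breaking.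
import Mathlib
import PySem

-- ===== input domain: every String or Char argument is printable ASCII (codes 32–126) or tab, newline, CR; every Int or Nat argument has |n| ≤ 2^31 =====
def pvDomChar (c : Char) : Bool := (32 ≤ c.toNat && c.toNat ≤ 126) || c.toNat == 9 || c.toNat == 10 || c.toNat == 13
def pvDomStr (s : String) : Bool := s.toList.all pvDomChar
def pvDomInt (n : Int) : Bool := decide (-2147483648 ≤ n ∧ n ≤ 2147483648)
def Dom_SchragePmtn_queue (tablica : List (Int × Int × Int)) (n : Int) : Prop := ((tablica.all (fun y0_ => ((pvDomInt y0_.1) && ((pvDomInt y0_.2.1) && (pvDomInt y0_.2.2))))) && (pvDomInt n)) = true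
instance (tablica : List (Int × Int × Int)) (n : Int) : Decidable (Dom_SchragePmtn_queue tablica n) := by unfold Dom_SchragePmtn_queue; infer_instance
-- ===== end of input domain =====

-- B replaces A's heapq binary heaps for the job sets G and N with plain lists scanned by
-- min()/remove()/append(); same loop structure and encodings, same return value (objective: simpler).

-- ===== PORT A =====
-- A uses heapq; the heap is ported verbatim from CPython's heapq (heapify/heappush/heappop with
-- _siftup/_siftdown), with Python's list/tuple lexicographic `<` modelled by the lexicographic
-- order on List Int (tuples in N and lists in G are both encoded as List Int, which is exact
-- since Python never compares a tuple with a list here).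
-- The while loops become fuel-structural recursion with provably sufficient fuel (totality
-- guards only): _siftdown's position strictly decreases (fuel = pos), _siftup's child index
-- strictly increases (fuel = endpos - childpos), the inner loop pops one element of N per
-- iteration (fuel = len(N)), and the outer loop runs at most 4*len+4 times.
-- pvGet i is Python's h[i] at the always-in-range indices A uses (the default is unreachable).
def pvGet {α : Type} [Inhabited α] (h : List α) (i : Nat) : α := h.getD i default

-- the `while pos > startpos` loop of CPython's _siftdown; fuel-structural (pos strictly
-- decreases each iteration, so fuel = pos makes the wrapper exact)
def pvSiftdownGo {α : Type} [LinearOrder α] [Inhabited α] :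
    Nat → List α → Nat → α → Nat → List α
  | 0, heap, _, newitem, pos => heap.set pos newitem
  | fuel + 1, heap, startpos, newitem, pos =>
    if startpos < pos then
      let parentpos := (pos - 1) / 2
      let parent := pvGet heap parentpos
      if newitem < parent then
        pvSiftdownGo fuel (heap.set pos parent) startpos newitem parentpos
      else heap.set pos newitem
    else heap.set pos newitem
def pvSiftdownLoop {α : Type} [LinearOrder α] [Inhabited α]
    (heap : List α) (startpos : Nat) (newitem : α) (pos : Nat) : List α :=
  pvSiftdownGo pos heap startpos newitem pos
def pvSiftupGo {α : Type} [LinearOrder α] [Inhabited α] :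
    Nat → Nat → Nat → α → List α → Nat → Nat → List α
  | 0, _, startpos, newitem, heap, pos, _ =>
    pvSiftdownLoop (heap.set pos newitem) startpos newitem pos
  | fuel + 1, endpos, startpos, newitem, heap, pos, childpos =>
    if childpos < endpos then
      let childpos2 := if childpos + 1 < endpos ∧ ¬ pvGet heap childpos < pvGet heap (childpos + 1)
        then childpos + 1 else childpos
      pvSiftupGo fuel endpos startpos newitem (heap.set pos (pvGet heap childpos2)) childpos2
        (2 * childpos2 + 1)
    else pvSiftdownLoop (heap.set pos newitem) startpos newitem pos
def pvSiftupLoop {α : Type} [LinearOrder α] [Inhabited α]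
    (endpos startpos : Nat) (newitem : α) (heap : List α) (pos childpos : Nat) : List α :=
  pvSiftupGo (endpos - childpos) endpos startpos newitem heap pos childpos
def pvSiftup {α : Type} [LinearOrder α] [Inhabited α] (heap : List α) (pos : Nat) : List α :=
  pvSiftupLoop heap.length pos (pvGet heap pos) heap pos (2 * pos + 1)
def pvHeappush {α : Type} [LinearOrder α] [Inhabited α] (heap : List α) (item : α) : List α :=
  pvSiftdownLoop (heap ++ [item]) 0 item heap.length
def pvHeappop {α : Type} [LinearOrder α] [Inhabited α] (heap : List α) : α × List α :=
  let lastelt := pvGet heap (heap.length - 1)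
  let rest := heap.dropLast
  if rest.isEmpty then (lastelt, [])
  else (pvGet rest 0, pvSiftup (rest.set 0 lastelt) 0)
def pvHeapify {α : Type} [LinearOrder α] [Inhabited α] (x : List α) : List α :=
  (List.range (x.length / 2)).reverse.foldl (fun h i => pvSiftup h i) x
def pvFlip (l : List Int) : List Int := (l.set 0 (-(pvGet l 2))).set 2 (pvGet l 0)

-- the inner `while N and t >= N[0][0]` loop; fuel-structural (each iteration pops one element
-- of N, so fuel = N.length makes the wrapper exact: at fuel 0, N = [] and the guard is false)
def pvInnerAGo : Nat → List (List Int) → List (List Int) → Int → List Int →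
    List (List Int) × List (List Int) × Int × List Int
  | 0, NA, GA, t, l => (NA, GA, t, l)
  | fuel + 1, NA, GA, t, l =>
    if NA ≠ [] ∧ pvGet (pvGet NA 0) 0 ≤ t then
      let pr := pvHeappop NA
      let j := pr.1
      let NA' := pr.2
      let rj := pvGet j 0
      let qj := pvGet j 2
      let GA' := pvHeappush GA ((j.set 0 (-qj)).set 2 rj)
      if pvGet l 2 < qj then
        let l' := l.set 1 (t - rj)
        if 0 < pvGet l' 1 then
          pvInnerAGo fuel NA' (pvHeappush GA' (pvFlip l')) rj (pvFlip l')
        else pvInnerAGo fuel NA' GA' rj l'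
      else pvInnerAGo fuel NA' GA' t l
    else (NA, GA, t, l)
def pvInnerA (NA GA : List (List Int)) (t : Int) (l : List Int) :
    List (List Int) × List (List Int) × Int × List Int :=
  pvInnerAGo NA.length NA GA t l
def pvOuterA : Nat → List (List Int) → List (List Int) → Int → Int → List Int → Int
  | 0, _, _, _, Cmax, _ => Cmax
  | fuel + 1, NA, GA, t, Cmax, l =>
    if GA ≠ [] ∨ NA ≠ [] then
      let r := pvInnerA NA GA t l
      let NA' := r.1
      let GA' := r.2.1
      let t' := r.2.2.1
      let l' := r.2.2.2
      if GA' ≠ [] then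
        let pr := pvHeappop GA'
        let j := pr.1
        let qj := pvGet j 0
        let rj := pvGet j 2
        let j2 := (j.set 0 rj).set 2 (-qj)
        let t2 := t' + pvGet j2 1
        pvOuterA fuel NA' pr.2 t2 (max Cmax (t2 + pvGet j2 2)) j2
      else
        pvOuterA fuel NA' GA' (pvGet (pvGet NA' 0) 0) Cmax l'
    else Cmax

-- fuel 4*len+4 bounds the number of outer-loop iterations; it is a totality guard only
def SchragePmtn_queue (tablica : List (Int × Int × Int)) (n : Int) : Int :=
  pvOuterA (4 * tablica.length + 4)
    (pvHeapify (tablica.map (fun x => [x.1, x.2.1, x.2.2]))) [] 0 0 [0, 0, 100000000, 0]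

-- ===== PORT B =====
-- B keeps G and N as plain lists: j = min(...) is a left fold keeping the first minimum (Python's
-- min), N.remove(j) is List.erase, G.append is ++ [_]; same loop structure and fuel as port A.
def pvFoldMin {α : Type} [LinearOrder α] (a : α) (xs : List α) : α :=
  xs.foldl (fun a b => if b < a then b else a) a
def pvMinL (l : List (List Int)) : List Int :=
  match l with
  | [] => []
  | x :: xs => pvFoldMin x xs
def pvInnerBGo : Nat → List (List Int) → List (List Int) → Int → List Int →
    List (List Int) × List (List Int) × Int × List Int
  | 0, NB, GB, t, l => (NB, GB, t, l)
  | fuel + 1, NB, GB, t, l =>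
    if NB ≠ [] ∧ pvGet (pvMinL NB) 0 ≤ t then
      let j := pvMinL NB
      let NB' := NB.erase j
      let rj := pvGet j 0
      let qj := pvGet j 2
      let GB' := GB ++ [[-qj, pvGet j 1, rj]]
      if pvGet l 2 < qj then
        let l' := l.set 1 (t - rj)
        if 0 < pvGet l' 1 then
          pvInnerBGo fuel NB' (GB' ++ [pvFlip l']) rj (pvFlip l')
        else pvInnerBGo fuel NB' GB' rj l'
      else pvInnerBGo fuel NB' GB' t l
    else (NB, GB, t, l)
def pvInnerB (NB GB : List (List Int)) (t : Int) (l : List Int) :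
    List (List Int) × List (List Int) × Int × List Int :=
  pvInnerBGo NB.length NB GB t l
def pvOuterB : Nat → List (List Int) → List (List Int) → Int → Int → List Int → Int
  | 0, _, _, _, Cmax, _ => Cmax
  | fuel + 1, NB, GB, t, Cmax, l =>
    if GB ≠ [] ∨ NB ≠ [] then
      let r := pvInnerB NB GB t l
      let NB' := r.1
      let GB' := r.2.1
      let t' := r.2.2.1
      let l' := r.2.2.2
      if GB' ≠ [] then
        let j := pvMinL GB'
        let GB'' := GB'.erase j
        let qj := pvGet j 0
        let rj := pvGet j 2
        let j2 := (j.set 0 rj).set 2 (-qj)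
        let t2 := t' + pvGet j2 1
        pvOuterB fuel NB' GB'' t2 (max Cmax (t2 + pvGet j2 2)) j2
      else
        pvOuterB fuel NB' GB' (pvGet (pvMinL NB') 0) Cmax l'
    else Cmax
def SchragePmtn_queue_alt (tablica : List (Int × Int × Int)) (n : Int) : Int :=
  pvOuterB (4 * tablica.length + 4)
    (tablica.map (fun x => [x.1, x.2.1, x.2.2])) [] 0 0 [0, 0, 100000000, 0]

-- ===== PRECONDITION & SPEC =====
-- No Pre_: the Python A returns normally on every input (each heappop/N[0] access is guarded).
def Spec_SchragePmtn_queue (tablica : List (Int × Int × Int)) (n : Int) (out : Int) : Prop := out = SchragePmtn_queue_alt tablica n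
instance (tablica : List (Int × Int × Int)) (n : Int) (out : Int) : Decidable (Spec_SchragePmtn_queue tablica n out) := by unfold Spec_SchragePmtn_queue; infer_instance

-- ===== CLAIM (what is proved, stated in full; the proofs are below) =====
def Claim_equal_SchragePmtn_queue : Prop := ∀ (tablica : List (Int × Int × Int)) (n : Int), Dom_SchragePmtn_queue tablica n → Spec_SchragePmtn_queue tablica n (SchragePmtn_queue tablica n)

-- ===== LEMMAS AND PROOFS =====

theorem pvSiftdownGo_length {α : Type} [LinearOrder α] [Inhabited α] :
    ∀ (fuel : Nat) (heap : List α) (s : Nat) (x : α) (p : Nat),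
      (pvSiftdownGo fuel heap s x p).length = heap.length := by
  intro fuel
  induction fuel with
  | zero => intro heap s x p; simp [pvSiftdownGo]
  | succ fuel ih =>
    intro heap s x p
    rw [pvSiftdownGo]
    by_cases h1 : s < p
    · simp only [if_pos h1]
      by_cases h2 : x < pvGet heap ((p - 1) / 2)
      · simp only [if_pos h2]
        rw [ih]
        simp
      · simp only [if_neg h2]
        simp
    · simp only [if_neg h1]
      simp

theorem pvSiftdownLoop_length {α : Type} [LinearOrder α] [Inhabited α]
    (heap : List α) (s : Nat) (x : α) (p : Nat) :
    (pvSiftdownLoop heap s x p).length = heap.length := pvSiftdownGo_length ..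

-- the `while childpos < endpos` loop of CPython's _siftup, ending in `heap[pos] = newitem;
-- _siftdown(heap, startpos, pos)`; fuel-structural (endpos - childpos strictly decreases,
-- so fuel = endpos - childpos makes the wrapper exact)

theorem pvSiftupGo_length {α : Type} [LinearOrder α] [Inhabited α] (endpos startpos : Nat) (x : α) :
    ∀ (fuel : Nat) (heap : List α) (pos childpos : Nat),
      (pvSiftupGo fuel endpos startpos x heap pos childpos).length = heap.length := by
  intro fuel
  induction fuel with
  | zero => intro heap pos cp; simp [pvSiftupGo, pvSiftdownLoop_length]
  | succ fuel ih =>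
    intro heap pos cp
    rw [pvSiftupGo]
    split
    · rw [ih]; simp
    · simp [pvSiftdownLoop_length]

theorem pvSiftupLoop_length {α : Type} [LinearOrder α] [Inhabited α]
    (endpos startpos : Nat) (x : α) (heap : List α) (pos childpos : Nat) :
    (pvSiftupLoop endpos startpos x heap pos childpos).length = heap.length :=
  pvSiftupGo_length ..

theorem pvSiftup_length {α : Type} [LinearOrder α] [Inhabited α] (heap : List α) (pos : Nat) :
    (pvSiftup heap pos).length = heap.length := by
  simp [pvSiftup, pvSiftupLoop_length]

theorem pvHeappop_snd_length {α : Type} [LinearOrder α] [Inhabited α] (heap : List α) :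
    (pvHeappop heap).2.length = heap.length - 1 := by
  simp only [pvHeappop]
  split
  · rename_i h
    have h2 : heap.dropLast = [] := by simpa [List.isEmpty_iff] using h
    have h3 := congrArg List.length h2
    simp at h3
    simp [h3]
  · simp [pvSiftup_length]

theorem pvFoldMin_mem {α : Type} [LinearOrder α] :
    ∀ (xs : List α) (a : α), pvFoldMin a xs = a ∨ pvFoldMin a xs ∈ xs := by
  intro xs
  induction xs with
  | nil => intro a; left; rfl
  | cons y ys ih =>
    intro a
    simp only [pvFoldMin, List.foldl_cons] at *
    by_cases hyx : y < a
    · simp only [if_pos hyx]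
      rcases ih y with h | h
      · right; simp [h]
      · right; exact List.mem_cons_of_mem _ h
    · simp only [if_neg hyx]
      rcases ih a with h | h
      · left; exact h
      · right; exact List.mem_cons_of_mem _ h

theorem pvMinL_mem (l : List (List Int)) (h : l ≠ []) : pvMinL l ∈ l := by
  match l with
  | x :: xs =>
    simp only [pvMinL]
    rcases pvFoldMin_mem xs x with h2 | h2
    · simp [h2]
    · exact List.mem_cons_of_mem _ h2

-- B's inner while loop; fuel-structural exactly as pvInnerAGo (one erase per iteration)

-- basic pvGet / List.set facts
theorem pvGet_eq_getElem {α : Type} [Inhabited α] (l : List α) (i : Nat) (h : i < l.length) :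
    pvGet l i = l[i] := List.getD_eq_getElem l default h

theorem pvGet_mem {α : Type} [Inhabited α] (l : List α) (i : Nat) (h : i < l.length) :
    pvGet l i ∈ l := by rw [pvGet_eq_getElem l i h]; exact List.getElem_mem h

theorem pvGet_set_self {α : Type} [Inhabited α] (l : List α) (i : Nat) (a : α) (h : i < l.length) :
    pvGet (l.set i a) i = a := by
  rw [pvGet_eq_getElem _ i (by simpa using h)]
  simp [List.getElem_set, h]

theorem pvGet_set_ne {α : Type} [Inhabited α] (l : List α) (i j : Nat) (a : α) (h : i ≠ j) :
    pvGet (l.set i a) j = pvGet l j := by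
  unfold pvGet
  by_cases hj : j < l.length
  · rw [List.getD_eq_getElem _ _ (by simpa using hj), List.getD_eq_getElem _ _ hj]
    simp [List.getElem_set, h]
  · rw [List.getD_eq_default _ _ (by simpa using hj), List.getD_eq_default _ _ (by omega)]

theorem set_pvGet_self {α : Type} [Inhabited α] (l : List α) (i : Nat) (h : i < l.length) :
    l.set i (pvGet l i) = l := by
  rw [pvGet_eq_getElem _ _ h]
  exact List.set_getElem_self h

theorem set_zero_perm {α : Type} [Inhabited α] (l : List α) (a : α) (h : l ≠ []) :
    (l.set 0 a).Perm (a :: l.tail) := by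
  cases l with
  | nil => exact absurd rfl h
  | cons x xs => simp

theorem cons_get_set_perm {α : Type} [Inhabited α] :
    ∀ (l : List α) (k : Nat) (x : α), k < l.length →
      (pvGet l k :: l.set k x).Perm (x :: l) := by
  intro l
  induction l with
  | nil => intro k x h; simp at h
  | cons z zs ih =>
    intro k x h
    cases k with
    | zero =>
      simp only [pvGet, List.getD_cons_zero, List.set_cons_zero]
      exact List.Perm.swap _ _ _
    | succ k =>
      have h1 : pvGet (z :: zs) (k+1) = pvGet zs k := by simp [pvGet]
      rw [h1, List.set_cons_succ]
      have hih := ih k x (by simpa using h)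
      exact List.Perm.trans (List.Perm.swap _ _ _)
        (List.Perm.trans (hih.cons z) (List.Perm.swap _ _ _))

theorem swap_set_perm {α : Type} [Inhabited α] :
    ∀ (l : List α) (i j : Nat) (x : α), i < l.length → j < l.length → i ≠ j →
      ((l.set i (pvGet l j)).set j x).Perm (l.set i x) := by
  intro l
  induction l with
  | nil => intro i j x hi; simp at hi
  | cons z zs ih =>
    intro i j x hi hj hij
    cases i with
    | zero =>
      cases j with
      | zero => exact absurd rfl hij
      | succ j =>
        have h1 : pvGet (z :: zs) (j+1) = pvGet zs j := by simp [pvGet]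
        rw [h1, List.set_cons_zero, List.set_cons_succ, List.set_cons_zero]
        exact cons_get_set_perm zs j x (by simpa using hj)
    | succ i =>
      cases j with
      | zero =>
        simp only [pvGet, List.getD_cons_zero, List.set_cons_succ, List.set_cons_zero]
        -- goal: (x :: zs.set i z).Perm (z :: zs.set i x)
        have h2 : (pvGet (zs.set i z) i :: (zs.set i z).set i x).Perm (x :: zs.set i z) :=
          cons_get_set_perm (zs.set i z) i x (by simpa using hi)
        have h3 : pvGet (zs.set i z) i = z := pvGet_set_self zs i z (by simpa using hi)
        have h4 : (zs.set i z).set i x = zs.set i x := List.set_set ..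
        rw [h3, h4] at h2
        exact h2.symm
      | succ j =>
        have h1 : pvGet (z :: zs) (j+1) = pvGet zs j := by simp [pvGet]
        rw [h1, List.set_cons_succ, List.set_cons_succ, List.set_cons_succ]
        exact List.Perm.cons _ (ih i j x (by simpa using hi) (by simpa using hj) (by omega))

theorem pvGet_append_lt {α : Type} [Inhabited α] (l l2 : List α) (i : Nat) (h : i < l.length) :
    pvGet (l ++ l2) i = pvGet l i := by
  rw [pvGet_eq_getElem _ _ (by simp; omega), pvGet_eq_getElem _ _ h]
  exact List.getElem_append_left h

-- parent / subtree machinery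
def pvPar (c : Nat) : Nat := (c - 1) / 2

theorem pvPar_lt (c : Nat) (h : 0 < c) : pvPar c < c := by unfold pvPar; omega

theorem pvPar_children (c q : Nat) (h : 0 < c) : pvPar c = q ↔ c = 2 * q + 1 ∨ c = 2 * q + 2 := by
  unfold pvPar; omega

def pvInSub (s : Nat) : Nat → Bool :=
  fun c => if s = c then true else if c = 0 then false else pvInSub s ((c - 1) / 2)
termination_by c => c
decreasing_by omega

theorem pvInSub_self (s : Nat) : pvInSub s s = true := by rw [pvInSub]; simp

theorem pvInSub_le (s : Nat) : ∀ c, pvInSub s c = true → s ≤ c := by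
  intro c
  induction c using Nat.strong_induction_on with
  | _ c ih =>
    intro h
    rw [pvInSub] at h
    split at h
    · omega
    · split at h
      · simp at h
      · have := ih ((c-1)/2) (by omega) h
        omega

theorem pvInSub_zero (c : Nat) : pvInSub 0 c = true := by
  induction c using Nat.strong_induction_on with
  | _ c ih =>
    rw [pvInSub]
    split
    · rfl
    · split
      · omega
      · exact ih ((c-1)/2) (by omega)

theorem pvInSub_par (s c : Nat) (hne : c ≠ s) (h : pvInSub s c = true) :
    pvInSub s (pvPar c) = true := by
  rw [pvInSub] at h
  split at h
  · omega
  · split at h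
    · simp at h
    · exact h

theorem pvInSub_of_par (s c : Nat) (hc : 0 < c) (h : pvInSub s (pvPar c) = true) :
    pvInSub s c = true := by
  rw [pvInSub]
  split
  · rfl
  · split
    · omega
    · exact h

def pvHeapProp {α : Type} [LinearOrder α] [Inhabited α] (h : List α) : Prop :=
  ∀ c, 0 < c → c < h.length → pvGet h (pvPar c) ≤ pvGet h c

def pvSubHeap {α : Type} [LinearOrder α] [Inhabited α] (h : List α) (s : Nat) : Prop :=
  ∀ c, 0 < c → c < h.length → c ≠ s → pvInSub s c = true → pvGet h (pvPar c) ≤ pvGet h c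

theorem pvSubHeap_zero {α : Type} [LinearOrder α] [Inhabited α] (h : List α) :
    pvSubHeap h 0 → pvHeapProp h := by
  intro hs c hc hlen
  exact hs c hc hlen (by omega) (pvInSub_zero c)

theorem pvSib_ne_s (s q' c : Nat) (hc : 0 < c) (hq' : pvInSub s q' = true) (hpar : pvPar c = q') :
    c ≠ s := by
  intro h
  have h1 := pvInSub_le s q' hq'
  have h2 := pvPar_lt c hc
  rw [hpar] at h2
  omega

theorem pvSiftdownGo_spec {α : Type} [LinearOrder α] [Inhabited α] (s : Nat) (x : α) :
    ∀ (fuel q : Nat) (heap : List α), q ≤ fuel → q < heap.length → pvInSub s q = true →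
    (∀ c, 0 < c → c < heap.length → c ≠ s → c ≠ q → pvPar c ≠ q → pvInSub s c = true →
        pvGet heap (pvPar c) ≤ pvGet heap c) →
    (∀ c, 0 < c → c < heap.length → pvPar c = q → x ≤ pvGet heap c) →
    (q ≠ s → ∀ c, 0 < c → c < heap.length → pvPar c = q → pvGet heap (pvPar q) ≤ pvGet heap c) →
    pvSubHeap (pvSiftdownGo fuel heap s x q) s ∧
    (pvSiftdownGo fuel heap s x q).Perm (heap.set q x) ∧
    (∀ j, pvInSub s j = false → pvGet (pvSiftdownGo fuel heap s x q) j = pvGet heap j) := by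
  intro fuel
  induction fuel with
  | zero =>
    intro q heap hfuel hq hqsub hA hB hC
    have hq0 : q = 0 := by omega
    subst hq0
    have hqs : 0 = s := by
      have := pvInSub_le s 0 hqsub
      omega
    rw [pvSiftdownGo]
    refine ⟨?_, List.Perm.refl _, ?_⟩
    · intro c hc hclen hcs hcsub
      simp only [List.length_set] at hclen
      have hcq : c ≠ 0 := by omega
      rw [pvGet_set_ne _ _ _ _ (Ne.symm hcq)]
      by_cases hpc : pvPar c = 0
      · rw [hpc, pvGet_set_self _ _ _ hq]
        exact hB c hc hclen hpc
      · rw [pvGet_set_ne _ _ _ _ (Ne.symm hpc)]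
        exact hA c hc hclen hcs hcq hpc hcsub
    · intro j hj
      have hjq : j ≠ 0 := by
        intro h; subst h
        rw [← hqs] at hj
        rw [pvInSub_self] at hj
        exact Bool.true_eq_false.mp hj
      exact pvGet_set_ne _ _ _ _ (Ne.symm hjq)
  | succ fuel ih =>
    intro q heap hfuel hq hqsub hA hB hC
    rw [pvSiftdownGo]
    by_cases hsq : s < q
    · simp only [if_pos hsq]
      by_cases hx : x < pvGet heap ((q - 1) / 2)
      · simp only [if_pos hx]
        -- recurse at parent with heap' := heap.set q parent
        have hparq : (q - 1) / 2 = pvPar q := rfl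
        rw [hparq]
        set q' := pvPar q with hq'def
        have hq'lt : q' < q := pvPar_lt q (by omega)
        have hq'len : q' < (heap.set q (pvGet heap q')).length := by simp; omega
        have hq'sub : pvInSub s q' = true := pvInSub_par s q (by omega) hqsub
        have hlen : ∀ c : Nat, c < (heap.set q (pvGet heap q')).length ↔ c < heap.length := by
          simp
        have hres := ih q' (heap.set q (pvGet heap q')) (by omega)
          hq'len hq'sub
          (by -- hA'
            intro c hc hclen hcs hcq' hpq' hcsub
            rw [hlen] at hclen
            have hcq : c ≠ q := by
              intro h; subst h
              exact hpq' rfl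
            by_cases hpc : pvPar c = q
            · rw [hpc, pvGet_set_self _ _ _ hq, pvGet_set_ne _ _ _ _ (Ne.symm hcq)]
              exact hC (by omega) c hc hclen hpc
            · rw [pvGet_set_ne _ _ _ _ (Ne.symm hpc), pvGet_set_ne _ _ _ _ (Ne.symm hcq)]
              exact hA c hc hclen hcs hcq hpc hcsub)
          (by -- hB'
            intro c hc hclen hpc
            rw [hlen] at hclen
            by_cases hcq : c = q
            · subst hcq
              rw [pvGet_set_self _ _ _ hq]
              exact le_of_lt hx
            · rw [pvGet_set_ne _ _ _ _ (fun h => hcq h.symm)]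
              have hcs : c ≠ s := pvSib_ne_s s q' c hc hq'sub hpc
              have hcsub : pvInSub s c = true := pvInSub_of_par s c hc (hpc ▸ hq'sub)
              have h1 : pvGet heap q' ≤ pvGet heap c := by
                have := hA c hc hclen hcs hcq (by rw [hpc]; omega) hcsub
                rwa [hpc] at this
              exact le_trans (le_of_lt hx) h1)
          (by -- hC'
            intro hq's c hc hclen hpc
            rw [hlen] at hclen
            have hq'pos : 0 < q' := by
              have := pvInSub_le s q' hq'sub
              omega
            have hq'q : q' ≠ q := by omega
            have hpq'q : pvPar q' ≠ q := by
              have := pvPar_lt q' hq'pos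
              omega
            have hedge : pvGet heap (pvPar q') ≤ pvGet heap q' :=
              hA q' hq'pos (by omega) hq's hq'q hpq'q hq'sub
            rw [pvGet_set_ne _ _ _ _ (Ne.symm hpq'q)]
            by_cases hcq : c = q
            · subst hcq
              rw [pvGet_set_self _ _ _ hq]
              exact hedge
            · rw [pvGet_set_ne _ _ _ _ (fun h => hcq h.symm)]
              have hcs : c ≠ s := pvSib_ne_s s q' c hc hq'sub hpc
              have hcsub : pvInSub s c = true := pvInSub_of_par s c hc (hpc ▸ hq'sub)
              have h1 : pvGet heap q' ≤ pvGet heap c := by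
                have := hA c hc hclen hcs hcq (by rw [hpc]; omega) hcsub
                rwa [hpc] at this
              exact le_trans hedge h1)
        refine ⟨hres.1, ?_, ?_⟩
        · exact hres.2.1.trans (swap_set_perm heap q q' x hq (by omega) (by omega))
        · intro j hj
          rw [hres.2.2 j hj]
          have hjq : j ≠ q := by
            intro h; subst h
            rw [hqsub] at hj
            exact Bool.true_eq_false.mp hj
          exact pvGet_set_ne _ _ _ _ (Ne.symm hjq)
      · simp only [if_neg hx]
        have hpar_le : pvGet heap (pvPar q) ≤ x := le_of_not_gt hx
        refine ⟨?_, List.Perm.refl _, ?_⟩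
        · intro c hc hclen hcs hcsub
          simp only [List.length_set] at hclen
          by_cases hcq : c = q
          · subst hcq
            have hpq : pvPar c ≠ c := by
              have := pvPar_lt c hc
              omega
            rw [pvGet_set_self _ _ _ hq, pvGet_set_ne _ _ _ _ (Ne.symm hpq)]
            exact hpar_le
          · rw [pvGet_set_ne _ _ _ _ (fun h => hcq h.symm)]
            by_cases hpc : pvPar c = q
            · rw [hpc, pvGet_set_self _ _ _ hq]
              exact hB c hc hclen hpc
            · rw [pvGet_set_ne _ _ _ _ (Ne.symm hpc)]
              exact hA c hc hclen hcs hcq hpc hcsub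
        · intro j hj
          have hjq : j ≠ q := by
            intro h; subst h
            rw [hqsub] at hj
            exact Bool.true_eq_false.mp hj
          exact pvGet_set_ne _ _ _ _ (Ne.symm hjq)
    · simp only [if_neg hsq]
      have hqs : q = s := by
        have := pvInSub_le s q hqsub
        omega
      subst hqs
      refine ⟨?_, List.Perm.refl _, ?_⟩
      · intro c hc hclen hcs hcsub
        simp only [List.length_set] at hclen
        have hcq : c ≠ q := hcs
        rw [pvGet_set_ne _ _ _ _ (fun h => hcq h.symm)]
        by_cases hpc : pvPar c = q
        · rw [hpc, pvGet_set_self _ _ _ hq]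
          exact hB c hc hclen hpc
        · rw [pvGet_set_ne _ _ _ _ (Ne.symm hpc)]
          exact hA c hc hclen hcs hcq hpc hcsub
      · intro j hj
        have hjq : j ≠ q := by
          intro h; subst h
          rw [hqsub] at hj
          exact Bool.true_eq_false.mp hj
        exact pvGet_set_ne _ _ _ _ (Ne.symm hjq)

theorem pvSiftdownLoop_spec {α : Type} [LinearOrder α] [Inhabited α] (s : Nat) (x : α)
    (q : Nat) (heap : List α) (hq : q < heap.length) (hqsub : pvInSub s q = true)
    (hA : ∀ c, 0 < c → c < heap.length → c ≠ s → c ≠ q → pvPar c ≠ q → pvInSub s c = true →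
        pvGet heap (pvPar c) ≤ pvGet heap c)
    (hB : ∀ c, 0 < c → c < heap.length → pvPar c = q → x ≤ pvGet heap c)
    (hC : q ≠ s → ∀ c, 0 < c → c < heap.length → pvPar c = q →
        pvGet heap (pvPar q) ≤ pvGet heap c) :
    pvSubHeap (pvSiftdownLoop heap s x q) s ∧
    (pvSiftdownLoop heap s x q).Perm (heap.set q x) ∧
    (∀ j, pvInSub s j = false → pvGet (pvSiftdownLoop heap s x q) j = pvGet heap j) :=
  pvSiftdownGo_spec s x q q heap le_rfl hq hqsub hA hB hC

theorem pvSiftupFinish_spec {α : Type} [LinearOrder α] [Inhabited α] (s : Nat) (x : α) (n : Nat)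
    (q : Nat) (heap : List α) (hlen : heap.length = n) (hq : q < n)
    (hqsub : pvInSub s q = true) (hchild : ¬ 2 * q + 1 < n)
    (hA : ∀ c, 0 < c → c < n → c ≠ s → pvInSub s c = true → pvPar c ≠ q →
        pvGet heap (pvPar c) ≤ pvGet heap c) :
    pvSubHeap (pvSiftdownLoop (heap.set q x) s x q) s ∧
    (pvSiftdownLoop (heap.set q x) s x q).Perm (heap.set q x) ∧
    (∀ j, pvInSub s j = false → pvGet (pvSiftdownLoop (heap.set q x) s x q) j = pvGet heap j) := by
  have hres := pvSiftdownLoop_spec s x q (heap.set q x) (by rw [List.length_set, hlen]; exact hq)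
    hqsub
    (by
      intro c hc hclen hcs hcq hpc hcsub
      simp only [List.length_set] at hclen
      rw [pvGet_set_ne _ _ _ _ (Ne.symm hpc), pvGet_set_ne _ _ _ _ (Ne.symm hcq)]
      exact hA c hc (by omega) hcs hcsub hpc)
    (by
      intro c hc hclen hpc
      have := (pvPar_children c q hc).mp hpc
      simp only [List.length_set] at hclen
      omega)
    (by
      intro hqs c hc hclen hpc
      have := (pvPar_children c q hc).mp hpc
      simp only [List.length_set] at hclen
      omega)
  refine ⟨hres.1, ?_, ?_⟩
  · refine hres.2.1.trans ?_
    rw [List.set_set]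
  · intro j hj
    rw [hres.2.2 j hj]
    have hjq : j ≠ q := by
      intro h; subst h
      rw [hqsub] at hj
      exact Bool.true_eq_false.mp hj
    exact pvGet_set_ne _ _ _ _ (Ne.symm hjq)

theorem pvSiftupGo_spec {α : Type} [LinearOrder α] [Inhabited α] (s : Nat) (x : α) (n : Nat) :
    ∀ (fuel q : Nat) (heap : List α), n ≤ 2 * q + 1 + fuel → heap.length = n → q < n →
    pvInSub s q = true →
    (∀ c, 0 < c → c < n → c ≠ s → pvInSub s c = true → pvPar c ≠ q →
        pvGet heap (pvPar c) ≤ pvGet heap c) →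
    (q ≠ s → ∀ c, 0 < c → c < n → pvPar c = q → pvGet heap (pvPar q) ≤ pvGet heap c) →
    pvSubHeap (pvSiftupGo fuel n s x heap q (2 * q + 1)) s ∧
    (pvSiftupGo fuel n s x heap q (2 * q + 1)).Perm (heap.set q x) ∧
    (∀ j, pvInSub s j = false → pvGet (pvSiftupGo fuel n s x heap q (2 * q + 1)) j = pvGet heap j) := by
  intro fuel
  induction fuel with
  | zero =>
    intro q heap hd hlen hq hqsub hA hB
    rw [pvSiftupGo]
    exact pvSiftupFinish_spec s x n q heap hlen hq hqsub (by omega) hA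
  | succ fuel ih =>
    intro q heap hd hlen hq hqsub hA hB
    rw [pvSiftupGo]
    by_cases hchild : 2 * q + 1 < n
    · simp only [if_pos hchild]
      set cp := if 2 * q + 1 + 1 < n ∧ ¬ pvGet heap (2 * q + 1) < pvGet heap (2 * q + 1 + 1)
        then 2 * q + 1 + 1 else 2 * q + 1 with hcpdef
      have hcp_gt : q < cp := by rw [hcpdef]; split <;> omega
      have hcp_lt : cp < n := by rw [hcpdef]; split <;> omega
      have hcp_par : pvPar cp = q := by
        rw [hcpdef]; split <;> (unfold pvPar; omega)
      have hcp_min : ∀ c, 0 < c → c < n → pvPar c = q → pvGet heap cp ≤ pvGet heap c := by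
        intro c hc hcn hpc
        rcases (pvPar_children c q hc).mp hpc with h | h
        · subst h
          rw [hcpdef]; split
          · rename_i hcond
            exact le_of_not_gt hcond.2
          · rfl
        · subst h
          rw [hcpdef]; split
          · rfl
          · rename_i hcond
            rw [not_and_or] at hcond
            rcases hcond with h | h
            · omega
            · exact le_of_lt (not_not.mp h)
      have hcp_pos : 0 < cp := by omega
      have hcp_sub : pvInSub s cp = true := pvInSub_of_par s cp hcp_pos (hcp_par ▸ hqsub)
      have hres := ih cp (heap.set q (pvGet heap cp)) (by omega) (by simpa using hlen)
        hcp_lt hcp_sub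
        (by -- hA'
          intro c hc hcn hcs hcsub hpccp
          by_cases hcq : c = q
          · subst hcq
            have hcpos : 0 < c := hc
            have hpar_ne : pvPar c ≠ c := by have := pvPar_lt c hc; omega
            rw [pvGet_set_self _ _ _ (by omega), pvGet_set_ne _ _ _ _ (Ne.symm hpar_ne)]
            exact hB hcs cp hcp_pos hcp_lt hcp_par
          · rw [pvGet_set_ne _ _ _ _ (Ne.symm hcq)]
            by_cases hpc : pvPar c = q
            · rw [hpc, pvGet_set_self _ _ _ (by omega)]
              exact hcp_min c hc hcn hpc
            · rw [pvGet_set_ne _ _ _ _ (Ne.symm hpc)]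
              exact hA c hc hcn hcs hcsub hpc)
        (by -- hB'
          intro hcps c hc hcn hpccp
          have hcgt : cp < c := by
            have := (pvPar_children c cp hc).mp hpccp
            omega
          have hcq : c ≠ q := by omega
          rw [hcp_par, pvGet_set_self _ _ _ (by omega), pvGet_set_ne _ _ _ _ (Ne.symm hcq)]
          have hcs : c ≠ s := pvSib_ne_s s cp c hc hcp_sub hpccp
          have hcsub : pvInSub s c = true := pvInSub_of_par s c hc (hpccp ▸ hcp_sub)
          have h1 := hA c hc hcn hcs hcsub (by omega)
          rwa [hpccp] at h1)
      refine ⟨hres.1, ?_, ?_⟩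
      · refine hres.2.1.trans ?_
        exact swap_set_perm heap q cp x (by omega) (by omega) (by omega)
      · intro j hj
        rw [hres.2.2 j hj]
        have hjq : j ≠ q := by
          intro h; subst h
          rw [hqsub] at hj
          exact Bool.true_eq_false.mp hj
        exact pvGet_set_ne _ _ _ _ (Ne.symm hjq)
    · simp only [if_neg hchild]
      exact pvSiftupFinish_spec s x n q heap hlen hq hqsub hchild hA

theorem pvSiftupLoop_spec {α : Type} [LinearOrder α] [Inhabited α] (s : Nat) (x : α) (n : Nat)
    (q : Nat) (heap : List α) (hlen : heap.length = n) (hq : q < n)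
    (hqsub : pvInSub s q = true)
    (hA : ∀ c, 0 < c → c < n → c ≠ s → pvInSub s c = true → pvPar c ≠ q →
        pvGet heap (pvPar c) ≤ pvGet heap c)
    (hB : q ≠ s → ∀ c, 0 < c → c < n → pvPar c = q → pvGet heap (pvPar q) ≤ pvGet heap c) :
    pvSubHeap (pvSiftupLoop n s x heap q (2 * q + 1)) s ∧
    (pvSiftupLoop n s x heap q (2 * q + 1)).Perm (heap.set q x) ∧
    (∀ j, pvInSub s j = false → pvGet (pvSiftupLoop n s x heap q (2 * q + 1)) j = pvGet heap j) :=
  pvSiftupGo_spec s x n (n - (2 * q + 1)) q heap (by omega) hlen hq hqsub hA hB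

theorem pvSiftup_spec {α : Type} [LinearOrder α] [Inhabited α] (heap : List α) (s : Nat)
    (hs : s < heap.length)
    (P : ∀ c, 0 < c → c < heap.length → c ≠ s → pvInSub s c = true → pvPar c ≠ s →
        pvGet heap (pvPar c) ≤ pvGet heap c) :
    pvSubHeap (pvSiftup heap s) s ∧ (pvSiftup heap s).Perm heap ∧
    (∀ j, pvInSub s j = false → pvGet (pvSiftup heap s) j = pvGet heap j) := by
  have hres := pvSiftupLoop_spec s (pvGet heap s) heap.length s heap
    rfl hs (pvInSub_self s) P (fun h => absurd rfl h)
  unfold pvSiftup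
  refine ⟨hres.1, ?_, hres.2.2⟩
  rw [set_pvGet_self heap s hs] at hres
  exact hres.2.1

theorem pvHeappush_spec {α : Type} [LinearOrder α] [Inhabited α] (heap : List α) (x : α)
    (hp : pvHeapProp heap) :
    pvHeapProp (pvHeappush heap x) ∧ (pvHeappush heap x).Perm (heap ++ [x]) := by
  have hlen : (heap ++ [x]).length = heap.length + 1 := by simp
  have hres := pvSiftdownLoop_spec 0 x heap.length (heap ++ [x])
    (by omega) (pvInSub_zero _)
    (by
      intro c hc hclen hcs hcq hpc _
      rw [hlen] at hclen
      have hcl : c < heap.length := by omega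
      have hpcl : pvPar c < heap.length := by
        have := pvPar_lt c hc
        omega
      rw [pvGet_append_lt _ _ _ hcl, pvGet_append_lt _ _ _ hpcl]
      exact hp c hc hcl)
    (by
      intro c hc hclen hpc
      have := (pvPar_children c heap.length hc).mp hpc
      rw [hlen] at hclen
      omega)
    (by
      intro _ c hc hclen hpc
      have := (pvPar_children c heap.length hc).mp hpc
      rw [hlen] at hclen
      omega)
  unfold pvHeappush
  refine ⟨pvSubHeap_zero _ hres.1, ?_⟩
  have h1 : (heap ++ [x])[heap.length]'(by simp) = x := by simp
  have hsetid := List.set_getElem_self (as := heap ++ [x]) (i := heap.length) (h := by simp)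
  rw [h1] at hsetid
  have := hres.2.1
  rwa [hsetid] at this

theorem pvHeappop_spec {α : Type} [LinearOrder α] [Inhabited α] (heap : List α)
    (hne : heap ≠ []) (hp : pvHeapProp heap) :
    (pvHeappop heap).1 = pvGet heap 0 ∧ pvHeapProp (pvHeappop heap).2 ∧
    (pvHeappop heap).2.Perm (heap.eraseIdx 0) := by
  have hlenpos : 0 < heap.length := List.length_pos_iff.mpr hne
  simp only [pvHeappop]
  split
  · rename_i hempty
    have h2 : heap.dropLast = [] := by simpa [List.isEmpty_iff] using hempty
    have h3 : heap.length = 1 := by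
      have := congrArg List.length h2
      simp at this
      omega
    refine ⟨by simp [h3], by intro c hc hclen; simp at hclen, ?_⟩
    match heap, h3 with
    | [a], _ => simp
  · rename_i hempty
    have hrne : heap.dropLast ≠ [] := by
      simpa [List.isEmpty_iff] using hempty
    have hm : heap.dropLast.length = heap.length - 1 := by simp
    have hmpos : 0 < heap.dropLast.length := List.length_pos_iff.mpr hrne
    have happ : heap.dropLast ++ [heap.getLast hne] = heap := List.dropLast_append_getLast hne
    have hlast : pvGet heap (heap.length - 1) = heap.getLast hne := by
      rw [pvGet_eq_getElem _ _ (by omega)]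
      exact (List.getLast_eq_getElem hne).symm
    have hrest_get : ∀ i, i < heap.dropLast.length → pvGet heap.dropLast i = pvGet heap i := by
      intro i hi
      conv_rhs => rw [← happ]
      rw [pvGet_append_lt _ _ _ hi]
    set h2 := heap.dropLast.set 0 (pvGet heap (heap.length - 1)) with h2def
    have h2len : h2.length = heap.dropLast.length := by simp [h2def]
    have hres := pvSiftup_spec h2 0 (by omega)
      (by
        intro c hc hclen hcs _ hpc
        have hpcpos : pvPar c < c := pvPar_lt c hc
        rw [h2len] at hclen
        rw [h2def, pvGet_set_ne _ _ _ _ (by omega), pvGet_set_ne _ _ _ _ (by omega),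
          hrest_get c hclen, hrest_get _ (by omega)]
        exact hp c hc (by omega))
    refine ⟨?_, pvSubHeap_zero _ hres.1, ?_⟩
    · rw [hrest_get 0 hmpos]
    · refine hres.2.1.trans ?_
      have hperm1 : h2.Perm (pvGet heap (heap.length - 1) :: heap.dropLast.tail) :=
        set_zero_perm _ _ hrne
      refine hperm1.trans ?_
      rw [hlast]
      have herase : heap.eraseIdx 0 = heap.dropLast.tail ++ [heap.getLast hne] := by
        conv_lhs => rw [← happ]
        match heap.dropLast, hrne with
        | b :: bs, _ => simp
      rw [herase]
      exact (List.perm_append_singleton _ _).symm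

def pvQProp {α : Type} [LinearOrder α] [Inhabited α] (h : List α) (i : Nat) : Prop :=
  ∀ c, 0 < c → c < h.length → i ≤ pvPar c → pvGet h (pvPar c) ≤ pvGet h c

theorem pvHeapify_fold {α : Type} [LinearOrder α] [Inhabited α] (n : Nat) :
    ∀ (i : Nat) (h : List α), h.length = n → i ≤ n / 2 → pvQProp h i →
    pvHeapProp ((List.range i).reverse.foldl (fun a b => pvSiftup a b) h) ∧
    ((List.range i).reverse.foldl (fun a b => pvSiftup a b) h).Perm h := by
  intro i
  induction i with
  | zero =>
    intro h hlen hi hQ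
    simp only [List.range_zero, List.reverse_nil, List.foldl_nil]
    exact ⟨fun c hc hclen => hQ c hc hclen (by omega), List.Perm.refl _⟩
  | succ i ih =>
    intro h hlen hi hQ
    have hstep : (List.range (i+1)).reverse = i :: (List.range i).reverse := by
      rw [List.range_succ, List.reverse_append]
      simp
    rw [hstep, List.foldl_cons]
    have hsn : i < h.length := by omega
    have hsift := pvSiftup_spec h i hsn
      (by
        intro c hc hclen hcs hcsub hpc
        have hsub := pvInSub_par i c hcs hcsub
        have := pvInSub_le i (pvPar c) hsub
        exact hQ c hc hclen (by omega))
    have hQ' : pvQProp (pvSiftup h i) i := by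
      intro c hc hclen hpar
      rw [pvSiftup_length] at hclen
      by_cases hsub : pvInSub i c = true
      · have hcne : c ≠ i := by
          have := pvPar_lt c hc
          omega
        exact hsift.1 c hc (by rw [pvSiftup_length]; omega) hcne hsub
      · have hpsub : pvInSub i (pvPar c) = false := by
          by_contra hcon
          exact hsub (pvInSub_of_par i c hc (by simpa using hcon))
        rw [hsift.2.2 c (by simpa using hsub), hsift.2.2 _ hpsub]
        have hpne : pvPar c ≠ i := by
          intro hcon
          rw [hcon] at hpsub
          rw [pvInSub_self] at hpsub
          exact Bool.true_eq_false.mp hpsub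
        exact hQ c hc hclen (by omega)
    have hres := ih (pvSiftup h i) (by rw [pvSiftup_length]; omega) (by omega) hQ'
    exact ⟨hres.1, hres.2.trans hsift.2.1⟩

theorem pvHeapify_spec {α : Type} [LinearOrder α] [Inhabited α] (x : List α) :
    pvHeapProp (pvHeapify x) ∧ (pvHeapify x).Perm x := by
  unfold pvHeapify
  exact pvHeapify_fold x.length (x.length / 2) x rfl le_rfl
    (by
      intro c hc hclen hpar
      unfold pvPar at hpar
      omega)

theorem pvRoot_le {α : Type} [LinearOrder α] [Inhabited α] (h : List α) (hp : pvHeapProp h) :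
    ∀ i, i < h.length → pvGet h 0 ≤ pvGet h i := by
  intro i
  induction i using Nat.strong_induction_on with
  | _ i ih =>
    intro hi
    rcases Nat.eq_zero_or_pos i with h0 | h0
    · subst h0; exact le_refl _
    · have hpar := pvPar_lt i h0
      exact le_trans (ih (pvPar i) hpar (by omega)) (hp i h0 hi)

theorem pvFoldMin_le {α : Type} [LinearOrder α] :
    ∀ (xs : List α) (a : α), pvFoldMin a xs ≤ a ∧ ∀ b ∈ xs, pvFoldMin a xs ≤ b := by
  intro xs
  induction xs with
  | nil => intro a; exact ⟨le_refl _, by simp⟩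
  | cons y ys ih =>
    intro a
    simp only [pvFoldMin, List.foldl_cons] at *
    have hstep : (if y < a then y else a) ≤ a ∧ (if y < a then y else a) ≤ y := by
      split <;> constructor <;> first | exact le_refl _ | omega | exact le_of_lt (by assumption) | exact le_of_not_gt (by assumption)
    refine ⟨le_trans (ih _).1 hstep.1, ?_⟩
    intro b hb
    rcases List.mem_cons.mp hb with hb | hb
    · subst hb; exact le_trans (ih _).1 hstep.2
    · exact (ih _).2 b hb

theorem pvMinL_le (l : List (List Int)) (b : List Int) (hb : b ∈ l) : pvMinL l ≤ b := by
  match l with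
  | x :: xs =>
    simp only [pvMinL]
    rcases List.mem_cons.mp hb with h | h
    · subst h; exact (pvFoldMin_le xs b).1
    · exact (pvFoldMin_le xs x).2 b h

theorem pvRoot_eq_minL (NA NB : List (List Int)) (hp : pvHeapProp NA) (hperm : NA.Perm NB)
    (hne : NA ≠ []) : pvGet NA 0 = pvMinL NB := by
  have hlenpos : 0 < NA.length := List.length_pos_iff.mpr hne
  have hBne : NB ≠ [] := by
    intro h
    subst h
    exact hne hperm.eq_nil
  have hroot_mem : pvGet NA 0 ∈ NB := hperm.mem_iff.mp (pvGet_mem NA 0 hlenpos)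
  have hmin_mem : pvMinL NB ∈ NA := hperm.mem_iff.mpr (pvMinL_mem NB hBne)
  obtain ⟨i, hi, hieq⟩ := List.getElem_of_mem hmin_mem
  have h1 : pvGet NA 0 ≤ pvMinL NB := by
    rw [← hieq, ← pvGet_eq_getElem _ _ hi]
    exact pvRoot_le NA hp i hi
  exact le_antisymm h1 (pvMinL_le NB _ hroot_mem)

theorem pvHeappush_length (heap : List (List Int)) (x : List Int) :
    (pvHeappush heap x).length = heap.length + 1 := by
  unfold pvHeappush
  rw [pvSiftdownLoop_length]
  simp

theorem pvErase_head (l : List (List Int)) (hne : l ≠ []) :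
    l.eraseIdx 0 = l.erase (pvGet l 0) := by
  match l with
  | a :: tl => simp [pvGet]

theorem pvPop_rest_perm (NA NB : List (List Int)) (hne : NA ≠ []) (hp : pvHeapProp NA)
    (hperm : NA.Perm NB) :
    (pvHeappop NA).2.Perm (NB.erase (pvMinL NB)) := by
  have hpop := pvHeappop_spec NA hne hp
  refine hpop.2.2.trans ?_
  rw [pvErase_head NA hne, pvRoot_eq_minL NA NB hp hperm hne]
  exact hperm.erase _

theorem pvInnerAGo_G_nil :
    ∀ (fuel : Nat) (NA GA : List (List Int)) (t : Int) (l : List Int), NA.length ≤ fuel →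
      (pvInnerAGo fuel NA GA t l).2.1 = [] → pvInnerAGo fuel NA GA t l = (NA, GA, t, l) := by
  intro fuel
  induction fuel with
  | zero => intro NA GA t l _ _; rw [pvInnerAGo]
  | succ fuel ih =>
    intro NA GA t l hk hnil
    rw [pvInnerAGo] at hnil ⊢
    by_cases hcond : NA ≠ [] ∧ pvGet (pvGet NA 0) 0 ≤ t
    · exfalso
      simp only [if_pos hcond] at hnil
      have hlenN : (pvHeappop NA).2.length ≤ fuel := by
        rw [pvHeappop_snd_length]
        have := List.length_pos_iff.mpr hcond.1
        omega
      have hpushne : ∀ (G : List (List Int)) (x : List Int), pvHeappush G x ≠ [] := by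
        intro G x h
        have := pvHeappush_length G x
        rw [h] at this
        simp at this
      split at hnil
      · split at hnil
        · have := ih _ _ _ _ hlenN hnil
          rw [this] at hnil
          exact hpushne _ _ hnil
        · have := ih _ _ _ _ hlenN hnil
          rw [this] at hnil
          exact hpushne _ _ hnil
      · have := ih _ _ _ _ hlenN hnil
        rw [this] at hnil
        exact hpushne _ _ hnil
    · simp only [if_neg hcond]

theorem pvInnerA_G_nil (NA GA : List (List Int)) (t : Int) (l : List Int)
    (h : (pvInnerA NA GA t l).2.1 = []) : pvInnerA NA GA t l = (NA, GA, t, l) :=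
  pvInnerAGo_G_nil NA.length NA GA t l le_rfl h

theorem pvInnerGo_equiv :
    ∀ (fuel : Nat) (NA GA NB GB : List (List Int)) (t : Int) (l : List Int),
      NA.length ≤ fuel → NA.Perm NB → pvHeapProp NA → GA.Perm GB → pvHeapProp GA →
      (∀ y ∈ NA, y.length = 3) →
      (pvInnerAGo fuel NA GA t l).1.Perm (pvInnerBGo fuel NB GB t l).1 ∧
      pvHeapProp (pvInnerAGo fuel NA GA t l).1 ∧
      (pvInnerAGo fuel NA GA t l).2.1.Perm (pvInnerBGo fuel NB GB t l).2.1 ∧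
      pvHeapProp (pvInnerAGo fuel NA GA t l).2.1 ∧
      (pvInnerAGo fuel NA GA t l).2.2.1 = (pvInnerBGo fuel NB GB t l).2.2.1 ∧
      (pvInnerAGo fuel NA GA t l).2.2.2 = (pvInnerBGo fuel NB GB t l).2.2.2 ∧
      (∀ y ∈ (pvInnerAGo fuel NA GA t l).1, y.length = 3) := by
  intro fuel
  induction fuel with
  | zero =>
    intro NA GA NB GB t l hk hN hpN hG hpG h3
    rw [pvInnerAGo, pvInnerBGo]
    exact ⟨hN, hpN, hG, hpG, rfl, rfl, h3⟩
  | succ fuel ih =>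
    intro NA GA NB GB t l hk hN hpN hG hpG h3
    by_cases hne : NA = []
    · subst hne
      have hBnil : NB = [] := hN.symm.eq_nil
      subst hBnil
      rw [pvInnerAGo, pvInnerBGo]
      simp only [ne_eq, not_true_eq_false, false_and, if_neg, if_false]
      exact ⟨hN, hpN, hG, hpG, trivial, trivial, h3⟩
    · have hBne : NB ≠ [] := fun h => hne (by rw [h] at hN; exact hN.eq_nil)
      have hroot : pvGet NA 0 = pvMinL NB := pvRoot_eq_minL NA NB hpN hN hne
      rw [pvInnerAGo, pvInnerBGo]
      by_cases hc : pvGet (pvGet NA 0) 0 ≤ t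
      · have hcB : pvGet (pvMinL NB) 0 ≤ t := by rwa [← hroot]
        simp only [if_pos (And.intro hne hc), if_pos (And.intro hBne hcB)]
        have hpop := pvHeappop_spec NA hne hpN
        have hj : (pvHeappop NA).1 = pvGet NA 0 := hpop.1
        have hNA' : (pvHeappop NA).2.Perm (NB.erase (pvMinL NB)) :=
          pvPop_rest_perm NA NB hne hpN hN
        have hpNA' : pvHeapProp (pvHeappop NA).2 := hpop.2.1
        have h3' : ∀ y ∈ (pvHeappop NA).2, y.length = 3 := by
          intro y hy
          have hy2 : y ∈ NA.eraseIdx 0 := hpop.2.2.mem_iff.mp hy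
          exact h3 y ((List.eraseIdx_sublist NA 0).mem hy2)
        have hjmem : pvGet NA 0 ∈ NA := pvGet_mem NA 0 (List.length_pos_iff.mpr hne)
        have hj3 : (pvGet NA 0).length = 3 := h3 _ hjmem
        obtain ⟨a, b, c, hjeq⟩ : ∃ a b c, pvGet NA 0 = [a, b, c] := by
          match hm : pvGet NA 0, hj3 with
          | [a, b, c], _ => exact ⟨a, b, c, rfl⟩
        have hklt : (pvHeappop NA).2.length ≤ fuel := by
          rw [pvHeappop_snd_length]
          have := List.length_pos_iff.mpr hne
          omega
        have hNA2 : (pvHeappop NA).2.Perm (NB.erase ([a, b, c] : List Int)) := by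
          rwa [← hroot, hjeq] at hNA'
        rw [hj, ← hroot, hjeq]
        -- both sides now compute with j = [a,b,c]
        have hset : (([a, b, c] : List Int).set 0 (-(pvGet ([a,b,c] : List Int) 2))).set 2
            (pvGet ([a,b,c] : List Int) 0) = [-(pvGet ([a,b,c] : List Int) 2), b,
              pvGet ([a,b,c] : List Int) 0] := rfl
        have hGpush := pvHeappush_spec GA
          ((([a,b,c] : List Int).set 0 (-(pvGet ([a,b,c] : List Int) 2))).set 2
            (pvGet ([a,b,c] : List Int) 0)) hpG
        have hG' : (pvHeappush GA ((([a,b,c] : List Int).set 0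
            (-(pvGet ([a,b,c] : List Int) 2))).set 2 (pvGet ([a,b,c] : List Int) 0))).Perm
            (GB ++ [[-(pvGet ([a,b,c] : List Int) 2), pvGet ([a,b,c] : List Int) 1,
              pvGet ([a,b,c] : List Int) 0]]) := by
          refine hGpush.2.trans ?_
          rw [hset]
          have : pvGet ([a,b,c] : List Int) 1 = b := rfl
          rw [this]
          exact hG.append_right _
        split
        · split
          · exact ih _ _ _ _ _ _ hklt hNA2 hpNA'
              (by
                refine (pvHeappush_spec _ _ hGpush.1).2.trans ?_
                exact hG'.append_right _)
              (pvHeappush_spec _ _ hGpush.1).1 h3'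
          · exact ih _ _ _ _ _ _ hklt hNA2 hpNA' hG' hGpush.1 h3'
        · exact ih _ _ _ _ _ _ hklt hNA2 hpNA' hG' hGpush.1 h3'
      · have hcB : ¬ pvGet (pvMinL NB) 0 ≤ t := by rwa [← hroot]
        simp only [if_neg (fun h : _ ∧ _ => hc h.2), if_neg (fun h : _ ∧ _ => hcB h.2)]
        exact ⟨hN, hpN, hG, hpG, trivial, trivial, h3⟩

theorem pvInner_equiv (NA GA NB GB : List (List Int)) (t : Int) (l : List Int)
    (hN : NA.Perm NB) (hpN : pvHeapProp NA) (hG : GA.Perm GB) (hpG : pvHeapProp GA)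
    (h3 : ∀ y ∈ NA, y.length = 3) :
    (pvInnerA NA GA t l).1.Perm (pvInnerB NB GB t l).1 ∧
    pvHeapProp (pvInnerA NA GA t l).1 ∧
    (pvInnerA NA GA t l).2.1.Perm (pvInnerB NB GB t l).2.1 ∧
    pvHeapProp (pvInnerA NA GA t l).2.1 ∧
    (pvInnerA NA GA t l).2.2.1 = (pvInnerB NB GB t l).2.2.1 ∧
    (pvInnerA NA GA t l).2.2.2 = (pvInnerB NB GB t l).2.2.2 ∧
    (∀ y ∈ (pvInnerA NA GA t l).1, y.length = 3) := by
  unfold pvInnerA pvInnerB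
  rw [← hN.length_eq]
  exact pvInnerGo_equiv NA.length NA GA NB GB t l le_rfl hN hpN hG hpG h3

theorem pvOuter_equiv :
    ∀ (fuel : Nat) (NA GA NB GB : List (List Int)) (t Cmax : Int) (l : List Int),
      NA.Perm NB → pvHeapProp NA → GA.Perm GB → pvHeapProp GA → (∀ y ∈ NA, y.length = 3) →
      pvOuterA fuel NA GA t Cmax l = pvOuterB fuel NB GB t Cmax l := by
  intro fuel
  induction fuel with
  | zero => intro NA GA NB GB t Cmax l _ _ _ _ _; rfl
  | succ fuel ih =>
    intro NA GA NB GB t Cmax l hN hpN hG hpG h3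
    rw [pvOuterA, pvOuterB]
    have hGiff : GA ≠ [] ↔ GB ≠ [] := by
      rw [← List.length_pos_iff, ← List.length_pos_iff, hG.length_eq]
    have hNiff : NA ≠ [] ↔ NB ≠ [] := by
      rw [← List.length_pos_iff, ← List.length_pos_iff, hN.length_eq]
    by_cases hcond : GA ≠ [] ∨ NA ≠ []
    · have hcondB : GB ≠ [] ∨ NB ≠ [] := by
        rcases hcond with h | h
        · exact Or.inl (hGiff.mp h)
        · exact Or.inr (hNiff.mp h)
      simp only [if_pos hcond, if_pos hcondB]
      have hI := pvInner_equiv NA GA NB GB t l hN hpN hG hpG h3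
      by_cases hGA' : (pvInnerA NA GA t l).2.1 = []
      · have hGB' : (pvInnerB NB GB t l).2.1 = [] := by
          rw [hGA'] at hI
          exact hI.2.2.1.symm.eq_nil
        simp only [if_neg (by simp [hGA'] : ¬ (pvInnerA NA GA t l).2.1 ≠ []),
          if_neg (by simp [hGB'] : ¬ (pvInnerB NB GB t l).2.1 ≠ [])]
        have hid := pvInnerA_G_nil NA GA t l hGA'
        have hNA'ne : (pvInnerA NA GA t l).1 ≠ [] := by
          rw [hid]
          rcases hcond with h | h
          · exfalso
            rw [hid] at hGA'
            exact h hGA'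
          · exact h
        have hroot : pvGet (pvInnerA NA GA t l).1 0 = pvMinL (pvInnerB NB GB t l).1 :=
          pvRoot_eq_minL _ _ hI.2.1 hI.1 hNA'ne
        rw [hroot, hI.2.2.2.2.2.1]
        exact ih _ _ _ _ _ _ _ hI.1 hI.2.1 hI.2.2.1 hI.2.2.2.1 hI.2.2.2.2.2.2
      · have hGB' : (pvInnerB NB GB t l).2.1 ≠ [] := by
          intro h
          rw [h] at hI
          exact hGA' ((h ▸ hI.2.2.1 : (pvInnerA NA GA t l).2.1.Perm ([] : List (List Int))).eq_nil)
        simp only [if_pos hGA', if_pos hGB']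
        have hpopG := pvHeappop_spec (pvInnerA NA GA t l).2.1 hGA' hI.2.2.2.1
        have hjg : (pvHeappop (pvInnerA NA GA t l).2.1).1 = pvGet (pvInnerA NA GA t l).2.1 0 :=
          hpopG.1
        have hrootG : pvGet (pvInnerA NA GA t l).2.1 0 = pvMinL (pvInnerB NB GB t l).2.1 :=
          pvRoot_eq_minL _ _ hI.2.2.2.1 hI.2.2.1 hGA'
        have hGrest : (pvHeappop (pvInnerA NA GA t l).2.1).2.Perm
            ((pvInnerB NB GB t l).2.1.erase (pvMinL (pvInnerB NB GB t l).2.1)) :=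
          pvPop_rest_perm _ _ hGA' hI.2.2.2.1 hI.2.2.1
        rw [hjg, hrootG, hI.2.2.2.2.1]
        exact ih _ _ _ _ _ _ _ hI.1 hI.2.1 hGrest hpopG.2.1 hI.2.2.2.2.2.2
    · have hcondB : ¬ (GB ≠ [] ∨ NB ≠ []) := by
        intro h
        rcases h with h | h
        · exact hcond (Or.inl (hGiff.mpr h))
        · exact hcond (Or.inr (hNiff.mpr h))
      simp only [if_neg hcond, if_neg hcondB]

theorem pvEquiv_main (tablica : List (Int × Int × Int)) (n : Int) :
    SchragePmtn_queue tablica n = SchragePmtn_queue_alt tablica n := by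
  unfold SchragePmtn_queue SchragePmtn_queue_alt
  have hhf := pvHeapify_spec (tablica.map (fun x => [x.1, x.2.1, x.2.2]))
  refine pvOuter_equiv _ _ _ _ _ _ _ _ hhf.2 hhf.1 (List.Perm.refl _)
    (by intro c hc hclen; simp at hclen) ?_
  intro y hy
  have := hhf.2.mem_iff.mp hy
  simp only [List.mem_map] at this
  obtain ⟨x, _, hx⟩ := this
  rw [← hx]
  rfl


-- ===== VERDICT (by name: the statement is the Claim_ definition above) =====
theorem SchragePmtn_queue_spec : Claim_equal_SchragePmtn_queue := by
  intro tablica n _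
  unfold Spec_SchragePmtn_queue
  exact pvEquiv_main tablica n
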